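-- pv_equiv track=rewrite | github.com/pascalxia/driver_attention_prediction | data_point_collector.py | crop_long_seqs
-- ===== SOURCE A (Python) =====
-- def crop_long_seqs(data_point_names, size_threshold):
--     sizes = [len(seq) for seq in data_point_names]
--     long_indices = [i for i,size in enumerate(sizes) if size>size_threshold]
--     if len(long_indices) == 0:
--         return data_point_names
--
--     for i in long_indices:
--         seq = data_point_names[i]
--         data_point_names.append(seq[size_threshold:])
--         data_point_names[i] = seq[:size_threshold]
--     return crop_long_seqs(data_point_names, size_threshold)
-- ===== SOURCE B (Python) =====
-- def crop_long_seqs(data_point_names, size_threshold):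
--     # One sequential pass with a moving index: the part before i is final
--     # (all chunks of size <= size_threshold), the part from i on is still to
--     # be examined; each overlong sequence is cut once, its tail re-queued at
--     # the end.  Works on a copy (unlike A, which mutates its argument).
--     out = list(data_point_names)
--     i = 0
--     while i < len(out):
--         seq = out[i]
--         if len(seq) > size_threshold:
--             out[i] = seq[:size_threshold]
--             out.append(seq[size_threshold:])
--         i += 1
--     return out
-- ===== Notes on version B (the rewrite author's own statement) =====
-- stated objective: alternative
-- what changed: Replaces A's recursive multi-pass scheme (recompute all sizes and all long indices over the whole grown list, split, recurse) by a single queue-style pass with a moving index that examines every element exactly once and re-queues the tail of each overlong sequence.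
import Mathlib
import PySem

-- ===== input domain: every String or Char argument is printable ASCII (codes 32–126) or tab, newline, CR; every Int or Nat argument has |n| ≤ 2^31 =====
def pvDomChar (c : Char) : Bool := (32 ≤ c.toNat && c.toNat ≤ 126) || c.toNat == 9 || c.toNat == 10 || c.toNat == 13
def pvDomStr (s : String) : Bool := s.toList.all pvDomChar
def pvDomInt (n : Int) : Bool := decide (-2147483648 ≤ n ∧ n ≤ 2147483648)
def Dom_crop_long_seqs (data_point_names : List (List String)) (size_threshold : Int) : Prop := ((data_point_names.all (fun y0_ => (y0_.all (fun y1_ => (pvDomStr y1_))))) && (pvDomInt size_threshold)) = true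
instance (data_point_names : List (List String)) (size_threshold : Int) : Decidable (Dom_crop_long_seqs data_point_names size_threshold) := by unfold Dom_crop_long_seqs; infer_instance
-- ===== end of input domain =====

-- B replaces A's recursive multi-pass rescans by one queue-style pass that cuts each
-- sequence once (objective: alternative); A mutates its Python argument while B works
-- on a copy, so the equivalence proved here is about the return value only.

-- ===== PORT A =====
-- A recurses until no sequence is longer than the threshold; each recursion step is one
-- pass that, for every overlong index, appends the tail and truncates in place.  The
-- recursion is ported with fuel (total length + 1, sufficient on Pre_).
def pvSumLen (l : List (List String)) : Nat := (l.map List.length).sum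

def cropA_pass (size_threshold : Int) (long_indices : List Int)
    (l : List (List String)) : List (List String) :=
  long_indices.foldl (fun acc i =>
    let seq := PySem.List.pyGetD acc i []
    PySem.List.pySetD (acc ++ [PySem.List.slice seq (some size_threshold) none]) i
      (PySem.List.slice seq none (some size_threshold))) l

def cropA_go (size_threshold : Int) : Nat → List (List String) → List (List String)
  | 0, l => l
  | fuel+1, l =>
    let sizes := l.map (fun seq => (seq.length : Int))
    let long_indices := ((PySem.List.enumerate sizes 0).filter
        (fun p => decide (size_threshold < p.2))).map (·.1)
    if long_indices.length = 0 then l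
    else cropA_go size_threshold fuel (cropA_pass size_threshold long_indices l)

def crop_long_seqs (data_point_names : List (List String)) (size_threshold : Int) :
    List (List String) :=
  cropA_go size_threshold (pvSumLen data_point_names + 1) data_point_names

-- ===== PORT B =====
-- Source B's while-loop over `out` with moving index i, transcribed with out = done ++ todo
-- and i = done.length; fuel (total length + count + 1) makes the growing loop total.
def cropB_go (size_threshold : Int) :
    Nat → List (List String) → List (List String) → List (List String)
  | 0, done, todo => done ++ todo
  | _+1, done, [] => done
  | fuel+1, done, seq :: rest =>
    if size_threshold < (seq.length : Int) then
      cropB_go size_threshold fuel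
        (done ++ [PySem.List.slice seq none (some size_threshold)])
        (rest ++ [PySem.List.slice seq (some size_threshold) none])
    else
      cropB_go size_threshold fuel (done ++ [seq]) rest

def crop_long_seqs_alt (data_point_names : List (List String)) (size_threshold : Int) :
    List (List String) :=
  cropB_go size_threshold (pvSumLen data_point_names + data_point_names.length + 1)
    [] data_point_names

-- ===== PRECONDITION & SPEC =====
-- Pre_ excludes exactly the inputs on which A never returns (it recurses forever and dies
-- with RecursionError): a threshold < 1 with a nonempty list, except the harmless case
-- threshold = 0 with only empty sequences, makes every pass re-append material forever.
def Pre_crop_long_seqs (data_point_names : List (List String)) (size_threshold : Int) : Prop :=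
  1 ≤ size_threshold ∨ data_point_names = [] ∨
    (size_threshold = 0 ∧ ∀ s ∈ data_point_names, s = [])
instance (data_point_names : List (List String)) (size_threshold : Int) :
    Decidable (Pre_crop_long_seqs data_point_names size_threshold) := by
  unfold Pre_crop_long_seqs; infer_instance

def pvWitness_crop_long_seqs : List (List String) × Int := ([["a", "b", "c"], ["d"]], 2)

def Spec_crop_long_seqs (data_point_names : List (List String)) (size_threshold : Int) (out : List (List String)) : Prop := out = crop_long_seqs_alt data_point_names size_threshold
instance (data_point_names : List (List String)) (size_threshold : Int) (out : List (List String)) : Decidable (Spec_crop_long_seqs data_point_names size_threshold out) := by unfold Spec_crop_long_seqs; infer_instance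

-- ===== CLAIM (what is proved, stated in full; the proofs are below) =====
def Claim_equal_crop_long_seqs : Prop := ∀ (data_point_names : List (List String)) (size_threshold : Int), Dom_crop_long_seqs data_point_names size_threshold → Pre_crop_long_seqs data_point_names size_threshold → Spec_crop_long_seqs data_point_names size_threshold (crop_long_seqs data_point_names size_threshold)

-- ===== LEMMAS AND PROOFS =====

-- abbreviations used only by the proofs
def pvLong (t : Int) (s : List String) : Bool := decide (t < (s.length : Int))
def pvHd (t : Int) (s : List String) : List String :=
  if pvLong t s then PySem.List.slice s none (some t) else s
def pvTails (t : Int) (l : List (List String)) : List (List String) :=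
  (l.filter (pvLong t)).map (fun s => PySem.List.slice s (some t) none)
def pvIdx (t : Int) (k : Int) (l : List (List String)) : List Int :=
  ((PySem.List.enumerate (l.map (fun seq => (seq.length : Int))) k).filter
      (fun p => decide (t < p.2))).map (·.1)
def pvExc (t : Int) (l : List (List String)) : Nat :=
  (l.map (fun s => if pvLong t s then s.length - t.toNat else 0)).sum
def pvAC (t : Int) (l : List (List String)) : List (List String) :=
  cropA_go t (pvExc t l + 1) l

lemma pvIdx_nil (t k : Int) : pvIdx t k [] = [] := rfl

lemma pvIdx_cons (t k : Int) (s : List String) (rest : List (List String)) :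
    pvIdx t k (s :: rest) =
      if pvLong t s then k :: pvIdx t (k+1) rest else pvIdx t (k+1) rest := by
  by_cases h : t < (s.length : Int) <;>
    simp [pvIdx, pvLong, PySem.List.enumerate_cons, List.filter_cons, h]

lemma pvIdx_eq_nil (t k : Int) (l : List (List String)) :
    pvIdx t k l = [] ↔ ∀ s ∈ l, pvLong t s = false := by
  induction l generalizing k with
  | nil => simp [pvIdx_nil]
  | cons s rest ih =>
    rw [pvIdx_cons]
    by_cases h : pvLong t s <;> simp [h, ih]

lemma pvGetD_append_len (pre z : List (List String)) (s : List String) :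
    PySem.List.pyGetD (pre ++ s :: z) (pre.length : Int) [] = s := by
  rw [PySem.List.pyGetD_natCast]
  induction pre with
  | nil => rfl
  | cons a pre ih => simpa using ih

lemma set_append_len (pre z : List (List String)) (s v : List String) :
    (pre ++ s :: z).set pre.length v = pre ++ v :: z := by
  induction pre with
  | nil => rfl
  | cons a pre ih => simpa using ih

-- the pass loop in closed form
lemma pass_gen (t : Int) (l : List (List String)) :
    ∀ (pre extra : List (List String)),
      cropA_pass t (pvIdx t (pre.length : Int) l) (pre ++ l ++ extra) =
        pre ++ l.map (pvHd t) ++ extra ++ pvTails t l := by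
  induction l with
  | nil => intro pre extra; simp [pvIdx_nil, cropA_pass, pvTails]
  | cons s rest ih =>
    intro pre extra
    rw [pvIdx_cons]
    by_cases h : pvLong t s
    · rw [if_pos h]
      have hstep : cropA_pass t ((pre.length : Int) :: pvIdx t ((pre.length : Int) + 1) rest)
            (pre ++ (s :: rest) ++ extra) =
          cropA_pass t (pvIdx t ((pre.length : Int) + 1) rest)
            ((pre ++ [PySem.List.slice s none (some t)]) ++ rest ++
              (extra ++ [PySem.List.slice s (some t) none])) := by
        show cropA_pass t (pvIdx t ((pre.length : Int) + 1) rest) _ = _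
        congr 1
        have hget : PySem.List.pyGetD (pre ++ (s :: rest) ++ extra) (pre.length : Int) [] = s := by
          have := pvGetD_append_len pre (rest ++ extra) s
          simpa using this
        simp only [hget]
        rw [PySem.List.pySetD_natCast]
        have : pre ++ (s :: rest) ++ extra ++ [PySem.List.slice s (some t) none] =
            pre ++ s :: (rest ++ extra ++ [PySem.List.slice s (some t) none]) := by simp
        rw [this, set_append_len]
        simp
      rw [hstep]
      have hcast : ((pre.length : Int) + 1) = (((pre ++ [PySem.List.slice s none (some t)]).length : Nat) : Int) := by
        push_cast; simp
      rw [hcast, ih]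
      simp [pvHd, pvTails, h]
    · rw [if_neg h]
      have hcast : ((pre.length : Int) + 1) = (((pre ++ [s]).length : Nat) : Int) := by
        push_cast; simp
      have hre : pre ++ (s :: rest) ++ extra = (pre ++ [s]) ++ rest ++ extra := by simp
      rw [hre, hcast, ih]
      simp [pvHd, pvTails, h]

lemma pass_eq (t : Int) (l : List (List String)) :
    cropA_pass t (pvIdx t 0 l) l = l.map (pvHd t) ++ pvTails t l := by
  have h := pass_gen t l [] []
  simpa using h

lemma cropA_go_succ (t : Int) (fuel : Nat) (l : List (List String)) :
    cropA_go t (fuel+1) l =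
      if pvIdx t 0 l = [] then l
      else cropA_go t fuel (cropA_pass t (pvIdx t 0 l) l) := by
  simp only [cropA_go, pvIdx, List.length_eq_zero_iff]

lemma go_prefix (t : Int) :
    ∀ (fuel : Nat) (done rest : List (List String)),
      (∀ s ∈ done, pvLong t s = false) →
      cropA_go t fuel (done ++ rest) = done ++ cropA_go t fuel rest := by
  intro fuel
  induction fuel with
  | zero => intro done rest _; rfl
  | succ fuel ih =>
    intro done rest hshort
    rw [cropA_go_succ, cropA_go_succ]
    have hiff : pvIdx t 0 (done ++ rest) = [] ↔ pvIdx t 0 rest = [] := by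
      rw [pvIdx_eq_nil, pvIdx_eq_nil]
      constructor
      · intro h s hs; exact h s (by simp [hs])
      · intro h s hs
        rcases List.mem_append.1 hs with h1 | h1
        · exact hshort s h1
        · exact h s h1
    by_cases hnil : pvIdx t 0 rest = []
    · rw [if_pos (hiff.2 hnil), if_pos hnil]
    · rw [if_neg (fun h => hnil (hiff.1 h)), if_neg hnil]
      have hpassA : cropA_pass t (pvIdx t 0 (done ++ rest)) (done ++ rest) =
          done ++ cropA_pass t (pvIdx t 0 rest) rest := by
        rw [pass_eq, pass_eq]
        have hmap : done.map (pvHd t) = done := by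
          have h1 : done.map (pvHd t) = done.map id :=
            List.map_congr_left (fun s hs => by simp [pvHd, hshort s hs])
          simpa using h1
        have hfilt : done.filter (pvLong t) = [] :=
          List.filter_eq_nil_iff.mpr (fun s hs => by simp [hshort s hs])
        have htails : pvTails t (done ++ rest) = pvTails t rest := by
          simp [pvTails, List.filter_append, hfilt]
        rw [List.map_append, hmap, htails, List.append_assoc]
      rw [hpassA]
      exact ih done _ hshort

-- facts about pvHd / pvTails / pvExc under 1 ≤ t
lemma pvTails_cons (t : Int) (s : List String) (rest : List (List String)) :
    pvTails t (s :: rest) =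
      if pvLong t s then PySem.List.slice s (some t) none :: pvTails t rest
      else pvTails t rest := by
  by_cases h : pvLong t s <;> simp [pvTails, List.filter_cons, h]

lemma pvExc_cons (t : Int) (s : List String) (rest : List (List String)) :
    pvExc t (s :: rest) =
      (if pvLong t s then s.length - t.toNat else 0) + pvExc t rest := by
  simp [pvExc]

lemma pvLong_facts (t : Int) (ht : 1 ≤ t) (s : List String) (h : pvLong t s = true) :
    t.toNat < s.length ∧ 1 ≤ t.toNat := by
  have h' : t < (s.length : Int) := by simpa [pvLong] using h
  omega

lemma hd_short (t : Int) (ht : 1 ≤ t) (s : List String) : pvLong t (pvHd t s) = false := by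
  unfold pvHd
  by_cases h : pvLong t s
  · rw [if_pos h, PySem.List.slice_to _ (by omega)]
    simp only [pvLong, List.length_take, decide_eq_false_iff_not]
    have := (pvLong_facts t ht s h).2
    omega
  · rw [if_neg h]; simpa using h

lemma drop_exc_lt (t : Int) (ht : 1 ≤ t) (s : List String) (h : pvLong t s = true) :
    (if pvLong t (PySem.List.slice s (some t) none) then
        (PySem.List.slice s (some t) none).length - t.toNat else 0) <
      s.length - t.toNat := by
  obtain ⟨h1, h2⟩ := pvLong_facts t ht s h
  rw [PySem.List.slice_from _ (by omega)]
  split_ifs <;> simp [List.length_drop] <;> omega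

lemma map_hd_short (t : Int) (ht : 1 ≤ t) (l : List (List String)) :
    ∀ s ∈ l.map (pvHd t), pvLong t s = false := by
  intro s hs
  rcases List.mem_map.1 hs with ⟨x, _, rfl⟩
  exact hd_short t ht x

lemma pvExc_append (t : Int) (a b : List (List String)) :
    pvExc t (a ++ b) = pvExc t a + pvExc t b := by
  simp [pvExc]

lemma pvExc_short (t : Int) (l : List (List String))
    (h : ∀ s ∈ l, pvLong t s = false) : pvExc t l = 0 := by
  induction l with
  | nil => rfl
  | cons s rest ih =>
    have hs := h s (by simp)
    simp [pvExc, hs] at *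
    exact ih (fun x hx => h x (by simp [hx]))

lemma pvExc_tails_le (t : Int) (ht : 1 ≤ t) (l : List (List String)) :
    pvExc t (pvTails t l) ≤ pvExc t l := by
  induction l with
  | nil => simp [pvTails, pvExc]
  | cons s rest ih =>
    rw [pvTails_cons, pvExc_cons]
    by_cases h : pvLong t s
    · rw [if_pos h, if_pos h, pvExc_cons]
      have := le_of_lt (drop_exc_lt t ht s h)
      omega
    · rw [if_neg h, if_neg h]
      omega

lemma pvExc_tails_lt (t : Int) (ht : 1 ≤ t) (l : List (List String))
    (h : ¬ ∀ s ∈ l, pvLong t s = false) :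
    pvExc t (pvTails t l) < pvExc t l := by
  induction l with
  | nil => exact absurd (by simp) h
  | cons s rest ih =>
    rw [pvTails_cons, pvExc_cons]
    by_cases hs : pvLong t s
    · rw [if_pos hs, if_pos hs, pvExc_cons]
      have h1 := drop_exc_lt t ht s hs
      have h2 := pvExc_tails_le t ht rest
      omega
    · rw [if_neg hs, if_neg hs]
      have : ¬ ∀ x ∈ rest, pvLong t x = false := by
        intro hall; apply h; intro x hx
        rcases List.mem_cons.1 hx with rfl | hx'
        · simpa using hs
        · exact hall x hx'
      have := ih this
      omega

lemma pvExc_le_sumLen (t : Int) (l : List (List String)) : pvExc t l ≤ pvSumLen l := by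
  induction l with
  | nil => simp [pvExc, pvSumLen]
  | cons s rest ih =>
    rw [pvExc_cons]
    have : pvSumLen (s :: rest) = s.length + pvSumLen rest := by simp [pvSumLen]
    rw [this]
    split_ifs <;> omega

-- fuel irrelevance
lemma go_fuel (t : Int) (ht : 1 ≤ t) :
    ∀ (f1 f2 : Nat) (l : List (List String)),
      pvExc t l < f1 → pvExc t l < f2 → cropA_go t f1 l = cropA_go t f2 l := by
  intro f1
  induction f1 with
  | zero => intro f2 l h1 _; omega
  | succ f1 ih =>
    intro f2 l h1 h2
    cases f2 with
    | zero => omega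
    | succ g =>
      rw [cropA_go_succ, cropA_go_succ]
      by_cases hnil : pvIdx t 0 l = []
      · rw [if_pos hnil, if_pos hnil]
      · rw [if_neg hnil, if_neg hnil, pass_eq]
        have hlong : ¬ ∀ s ∈ l, pvLong t s = false := fun hall => hnil ((pvIdx_eq_nil t 0 l).2 hall)
        have hexc : pvExc t (l.map (pvHd t) ++ pvTails t l) < pvExc t l := by
          rw [pvExc_append, pvExc_short t _ (map_hd_short t ht l), Nat.zero_add]
          exact pvExc_tails_lt t ht l hlong
        exact ih g _ (by omega) (by omega)

lemma pvAC_base (t : Int) (l : List (List String)) (h : pvIdx t 0 l = []) :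
    pvAC t l = l := by
  unfold pvAC
  rw [cropA_go_succ, if_pos h]

lemma pvAC_step (t : Int) (ht : 1 ≤ t) (l : List (List String)) (h : pvIdx t 0 l ≠ []) :
    pvAC t l = pvAC t (l.map (pvHd t) ++ pvTails t l) := by
  unfold pvAC
  rw [cropA_go_succ, if_neg h, pass_eq]
  have hlong : ¬ ∀ s ∈ l, pvLong t s = false := fun hall => h ((pvIdx_eq_nil t 0 l).2 hall)
  have hexc : pvExc t (l.map (pvHd t) ++ pvTails t l) < pvExc t l := by
    rw [pvExc_append, pvExc_short t _ (map_hd_short t ht l), Nat.zero_add]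
    exact pvExc_tails_lt t ht l hlong
  exact go_fuel t ht _ _ _ (by omega) (by omega)

lemma pvAC_prefix (t : Int) (done rest : List (List String))
    (h : ∀ s ∈ done, pvLong t s = false) :
    pvAC t (done ++ rest) = done ++ pvAC t rest := by
  unfold pvAC
  rw [pvExc_append, pvExc_short t done h, Nat.zero_add]
  exact go_prefix t _ done rest h

lemma pvSumLen_append (a b : List (List String)) :
    pvSumLen (a ++ b) = pvSumLen a + pvSumLen b := by simp [pvSumLen]

lemma pvSumLen_cons (s : List String) (rest : List (List String)) :
    pvSumLen (s :: rest) = s.length + pvSumLen rest := by simp [pvSumLen]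

lemma pvSumLen_tails_le (t : Int) (ht : 1 ≤ t) (l : List (List String)) :
    pvSumLen (pvTails t l) ≤ pvSumLen l := by
  induction l with
  | nil => simp [pvTails, pvSumLen]
  | cons s rest ih =>
    rw [pvTails_cons, pvSumLen_cons]
    by_cases h : pvLong t s
    · rw [if_pos h, pvSumLen_cons, PySem.List.slice_from _ (by omega)]
      simp only [List.length_drop]
      omega
    · rw [if_neg h]
      omega

lemma pvTails_append (t : Int) (a b : List (List String)) :
    pvTails t (a ++ b) = pvTails t a ++ pvTails t b := by
  simp [pvTails, List.filter_append]

-- rotation: moving the freshly split tail from the back of the queue next to the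
-- still-unsplit tails
lemma len_le_sumLen (s : List String) (l : List (List String)) (hs : s ∈ l) :
    s.length ≤ pvSumLen l := by
  induction l with
  | nil => simp at hs
  | cons a r ih =>
    rw [pvSumLen_cons]
    rcases List.mem_cons.1 hs with rfl | h1
    · omega
    · have := ih h1; omega

lemma map_hd_id (t : Int) (l : List (List String)) (h : ∀ s ∈ l, pvLong t s = false) :
    l.map (pvHd t) = l := by
  have h1 : l.map (pvHd t) = l.map id :=
    List.map_congr_left (fun s hs => by simp [pvHd, h s hs])
  simpa using h1

lemma pvTails_short (t : Int) (l : List (List String)) (h : ∀ s ∈ l, pvLong t s = false) :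
    pvTails t l = [] := by
  have hfilt : l.filter (pvLong t) = [] :=
    List.filter_eq_nil_iff.mpr (fun s hs => by simp [h s hs])
  simp [pvTails, hfilt]

lemma pvAC_allshort (t : Int) (l : List (List String)) (h : ∀ s ∈ l, pvLong t s = false) :
    pvAC t l = l :=
  pvAC_base t l ((pvIdx_eq_nil t 0 l).2 h)

-- the rotation in the degenerate case: nothing is long
lemma pvRot_short (t : Int) (ht : 1 ≤ t) (rest : List (List String)) (x : List String)
    (hall : ∀ s ∈ rest ++ [x], pvLong t s = false) :
    pvAC t (rest ++ [x]) = rest.map (pvHd t) ++ pvAC t (x :: pvTails t rest) := by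
  have hx : pvLong t x = false := hall x (by simp)
  have hrest : ∀ s ∈ rest, pvLong t s = false := fun s hs => hall s (by simp [hs])
  rw [pvAC_allshort t _ hall, map_hd_id t rest hrest, pvTails_short t rest hrest]
  rw [pvAC_allshort t [x] (by intro s hs; simp at hs; subst hs; exact hx)]

lemma slice_from_len (t : Int) (ht : 1 ≤ t) (x : List String) :
    (PySem.List.slice x (some t) none).length = x.length - t.toNat := by
  rw [PySem.List.slice_from _ (by omega)]
  simp

-- rotation: moving the freshly split tail from the back of the queue next to the
-- still-unsplit tails
lemma pvRotation (t : Int) (ht : 1 ≤ t) :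
    ∀ (n : Nat) (rest : List (List String)) (x : List String),
      pvSumLen (rest ++ [x]) ≤ n →
      pvAC t (rest ++ [x]) = rest.map (pvHd t) ++ pvAC t (x :: pvTails t rest) := by
  intro n
  induction n with
  | zero =>
    intro rest x hn
    apply pvRot_short t ht
    intro s hs
    have h1 := len_le_sumLen s _ hs
    have h2 : s.length = 0 := by omega
    simp [pvLong, h2]
    omega
  | succ n ih =>
    intro rest x hn
    by_cases hnil : pvIdx t 0 (rest ++ [x]) = []
    · exact pvRot_short t ht rest x ((pvIdx_eq_nil t 0 _).1 hnil)
    · rw [pvAC_step t ht _ hnil, List.map_append, pvTails_append]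
      by_cases hx : pvLong t x
      · -- x is long: its head chunk stays, its tail is re-queued
        obtain ⟨hx1, hx2⟩ := pvLong_facts t ht x hx
        have hmapx : [x].map (pvHd t) = [pvHd t x] := by simp
        have htailx : pvTails t [x] = [PySem.List.slice x (some t) none] := by
          rw [pvTails_cons]; simp [hx, pvTails]
        rw [hmapx, htailx]
        have hshape : rest.map (pvHd t) ++ [pvHd t x] ++
              (pvTails t rest ++ [PySem.List.slice x (some t) none]) =
            (rest.map (pvHd t) ++ [pvHd t x]) ++
              (pvTails t rest ++ [PySem.List.slice x (some t) none]) := by simp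
        rw [hshape, pvAC_prefix t _ _ (by
          intro s hs
          rcases List.mem_append.1 hs with h1 | h1
          · exact map_hd_short t ht rest s h1
          · simp at h1; subst h1; exact hd_short t ht x)]
        have hlen : pvSumLen (pvTails t rest ++ [PySem.List.slice x (some t) none]) ≤ n := by
          have h1 := pvSumLen_tails_le t ht rest
          have h2 := slice_from_len t ht x
          have h3 : pvSumLen (rest ++ [x]) = pvSumLen rest + x.length := by
            rw [pvSumLen_append]; simp [pvSumLen]
          have h4 : pvSumLen (pvTails t rest ++ [PySem.List.slice x (some t) none]) =
              pvSumLen (pvTails t rest) + (x.length - t.toNat) := by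
            simp [pvSumLen_append, pvSumLen, h2]
          omega
        rw [ih _ _ hlen]
        -- the right-hand side
        have hne : pvIdx t 0 (x :: pvTails t rest) ≠ [] := by
          intro hcon
          have := (pvIdx_eq_nil t 0 _).1 hcon x (by simp)
          rw [hx] at this; exact absurd this (by simp)
        rw [pvAC_step t ht _ hne]
        have hcons : (x :: pvTails t rest).map (pvHd t) ++ pvTails t (x :: pvTails t rest) =
            (pvHd t x :: (pvTails t rest).map (pvHd t)) ++
              ([PySem.List.slice x (some t) none] ++ pvTails t (pvTails t rest)) := by
          rw [pvTails_cons, if_pos hx]; simp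
        rw [hcons]
        rw [pvAC_prefix t _ _ (by
          intro s hs
          rcases List.mem_cons.1 hs with rfl | h1
          · exact hd_short t ht x
          · exact map_hd_short t ht _ s h1)]
        have hfin : pvAC t ([PySem.List.slice x (some t) none] ++ pvTails t (pvTails t rest)) =
            pvAC t (PySem.List.slice x (some t) none :: pvTails t (pvTails t rest)) := by simp
        rw [hfin]
        simp
      · -- x is short
        have hxf : pvLong t x = false := by simpa using hx
        have hmapx : [x].map (pvHd t) = [x] := by simp [pvHd, hxf]
        have htailx : pvTails t [x] = [] := by rw [pvTails_cons]; simp [hxf, pvTails]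
        rw [hmapx, htailx, List.append_nil]
        have hshape : rest.map (pvHd t) ++ [x] ++ pvTails t rest =
            (rest.map (pvHd t) ++ [x]) ++ pvTails t rest := by simp
        rw [hshape, pvAC_prefix t _ _ (by
          intro s hs
          rcases List.mem_append.1 hs with h1 | h1
          · exact map_hd_short t ht rest s h1
          · simp at h1; subst h1; exact hxf)]
        have hrhs : pvAC t (x :: pvTails t rest) = [x] ++ pvAC t (pvTails t rest) :=
          pvAC_prefix t [x] _ (by intro s hs; simp at hs; subst hs; exact hxf)
        rw [hrhs]
        simp

-- the queue loop computes pvAC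
lemma B_eq (t : Int) (ht : 1 ≤ t) :
    ∀ (fuel : Nat) (done todo : List (List String)),
      (∀ s ∈ done, pvLong t s = false) →
      pvSumLen todo + todo.length < fuel →
      cropB_go t fuel done todo = done ++ pvAC t todo := by
  intro fuel
  induction fuel with
  | zero => intro done todo _ hm; omega
  | succ fuel ih =>
    intro done todo hshort hm
    cases todo with
    | nil =>
      rw [pvAC_allshort t [] (by simp)]
      simp [cropB_go]
    | cons s rest =>
      simp only [cropB_go]
      by_cases hs : t < (s.length : Int)
      · rw [if_pos hs]
        have hlong : pvLong t s = true := by simp [pvLong, hs]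
        obtain ⟨h1, h2⟩ := pvLong_facts t ht s hlong
        have htx : PySem.List.slice s none (some t) = pvHd t s := by
          simp [pvHd, hlong]
        have hm' : pvSumLen (rest ++ [PySem.List.slice s (some t) none]) +
            (rest ++ [PySem.List.slice s (some t) none]).length < fuel := by
          have hlen := slice_from_len t ht s
          have e1 : pvSumLen (rest ++ [PySem.List.slice s (some t) none]) =
              pvSumLen rest + (s.length - t.toNat) := by
            simp [pvSumLen_append, pvSumLen, hlen]
          have e2 : pvSumLen (s :: rest) = s.length + pvSumLen rest := pvSumLen_cons s rest
          simp only [List.length_append, List.length_cons, List.length_nil] at hm ⊢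
          rw [e2] at hm
          omega
        rw [ih _ _ (by
          intro y hy
          rcases List.mem_append.1 hy with h3 | h3
          · exact hshort y h3
          · simp at h3; subst h3; rw [htx]; exact hd_short t ht s) hm']
        rw [pvRotation t ht (pvSumLen (rest ++ [PySem.List.slice s (some t) none])) rest
          (PySem.List.slice s (some t) none) (le_refl _)]
        -- right-hand side
        have hne : pvIdx t 0 (s :: rest) ≠ [] := by
          intro hcon
          have := (pvIdx_eq_nil t 0 _).1 hcon s (by simp)
          rw [hlong] at this; exact absurd this (by simp)
        rw [pvAC_step t ht _ hne]
        have hcons : (s :: rest).map (pvHd t) ++ pvTails t (s :: rest) =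
            (pvHd t s :: rest.map (pvHd t)) ++
              (PySem.List.slice s (some t) none :: pvTails t rest) := by
          rw [pvTails_cons, if_pos hlong]; simp
        rw [hcons, pvAC_prefix t _ _ (by
          intro y hy
          rcases List.mem_cons.1 hy with rfl | h3
          · exact hd_short t ht s
          · exact map_hd_short t ht _ y h3)]
        rw [htx]
        simp
      · rw [if_neg hs]
        have hsf : pvLong t s = false := by simp [pvLong, hs]
        have hm' : pvSumLen rest + rest.length < fuel := by
          have e2 : pvSumLen (s :: rest) = s.length + pvSumLen rest := pvSumLen_cons s rest
          simp only [List.length_cons] at hm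
          rw [e2] at hm
          omega
        rw [ih _ _ (by
          intro y hy
          rcases List.mem_append.1 hy with h3 | h3
          · exact hshort y h3
          · simp at h3; subst h3; exact hsf) hm']
        have := pvAC_prefix t [s] rest (by intro y hy; simp at hy; subst hy; exact hsf)
        rw [show s :: rest = [s] ++ rest from rfl, this]
        simp

lemma B_allshort (t : Int) :
    ∀ (fuel : Nat) (done todo : List (List String)),
      (∀ s ∈ todo, pvLong t s = false) → todo.length < fuel →
      cropB_go t fuel done todo = done ++ todo := by
  intro fuel
  induction fuel with
  | zero => intro done todo _ hm; omega
  | succ fuel ih =>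
    intro done todo hshort hm
    cases todo with
    | nil => simp [cropB_go]
    | cons s rest =>
      simp only [cropB_go]
      have hsf : pvLong t s = false := hshort s (by simp)
      have hs : ¬ t < (s.length : Int) := by simpa [pvLong] using hsf
      rw [if_neg hs]
      rw [ih _ _ (fun y hy => hshort y (by simp [hy])) (by simp at hm ⊢; omega)]
      simp

-- ===== VERDICT (by name: the statement is the Claim_ definition above) =====
theorem crop_long_seqs_spec : Claim_equal_crop_long_seqs := by
  intro l t _ hpre
  unfold Spec_crop_long_seqs crop_long_seqs crop_long_seqs_alt
  rcases hpre with ht | rfl | ⟨rfl, hall⟩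
  · -- the main case: 1 ≤ size_threshold
    have hA : cropA_go t (pvSumLen l + 1) l = pvAC t l := by
      have hle := pvExc_le_sumLen t l
      exact go_fuel t ht _ _ l (by omega) (by omega)
    have hB : cropB_go t (pvSumLen l + l.length + 1) [] l = [] ++ pvAC t l :=
      B_eq t ht _ [] l (by simp) (by omega)
    rw [hA, hB]
    simp
  · -- empty list
    rfl
  · -- threshold 0 with only empty sequences: nothing is long
    have hshort : ∀ s ∈ l, pvLong 0 s = false := by
      intro s hs
      simp [pvLong, hall s hs]
    rw [cropA_go_succ, if_pos ((pvIdx_eq_nil 0 0 l).2 hshort)]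
    rw [B_allshort 0 _ [] l hshort (by omega)]
    simp
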